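-- pv_equiv track=rewrite | github.com/posl/comment_recommendation | script/mod_gen/3_time/zh/105_C/4.py | base_m2
-- ===== SOURCE A (Python) =====
-- def base_m2(num):
--     result = []
--     while num != 0:
--         if num % (-2) == 0:
--             result.append(0)
--             num = num // (-2)
--         else:
--             result.append(1)
--             num = (num - 1) // (-2)
--     result.reverse()
--     return result
-- ===== SOURCE B (Python) =====
-- def base_m2(num):
--     # Base -2 digits via the bitwise recurrence: d = num & 1, num -> -(num >> 1).
--     # Correct because num - (num & 1) is even and (num - d) / (-2) = -(num >> 1).
--     if num == 0:
--         return []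
--     return base_m2(-(num >> 1)) + [num & 1]
-- ===== Notes on version B (the rewrite author's own statement) =====
-- stated objective: alternative
-- what changed: Replaces A's two-branch loop (test the remainder by -2, append digits to an LSB-first list, final reverse) by a branch-free recursion on the bitwise recurrence digit = lowest bit of num, next = negated arithmetic right shift of num, building the digit list directly in most-significant-first order with no remainder branch, no accumulator and no reverse.
import Mathlib
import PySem

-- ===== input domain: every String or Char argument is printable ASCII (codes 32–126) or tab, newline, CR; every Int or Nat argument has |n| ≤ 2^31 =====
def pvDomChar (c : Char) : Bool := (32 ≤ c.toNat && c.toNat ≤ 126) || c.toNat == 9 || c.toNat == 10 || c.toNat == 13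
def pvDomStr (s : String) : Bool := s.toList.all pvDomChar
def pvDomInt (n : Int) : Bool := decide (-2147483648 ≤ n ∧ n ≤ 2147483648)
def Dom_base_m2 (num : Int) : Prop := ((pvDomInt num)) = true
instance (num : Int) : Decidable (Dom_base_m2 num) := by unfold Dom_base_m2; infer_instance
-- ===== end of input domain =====

-- B replaces A's two-branch loop + reverse by a branch-free bitwise recursion (alternative decomposition).

-- fuel bound for the base -2 division loop/recursion: 2|n| for n ≥ 0, 3|n| for n < 0;
-- it strictly decreases along the loop's recurrence (pvMeas_even/odd below), so it
-- over-counts the number of iterations and the fuel guard is never hit.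
def pvMeas (num : Int) : Nat := 2 * num.natAbs + ((num.natAbs : Int) - num).toNat / 2

-- ===== PORT A =====
-- the while loop, with structural fuel ≥ the iteration count (pure totalization; the 0-fuel arm is unreachable)
def base_m2_loopF : Nat → Int → List Int → List Int
  | 0, _, result => result
  | fuel+1, num, result =>
    if num = 0 then result
    else if PySem.Int.mod num (-2) = 0 then
      base_m2_loopF fuel (PySem.Int.floordiv num (-2)) (result ++ [0])
    else
      base_m2_loopF fuel (PySem.Int.floordiv (num - 1) (-2)) (result ++ [1])

def base_m2 (num : Int) : List Int := (base_m2_loopF (pvMeas num) num []).reverse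

-- ===== PORT B =====
-- Python's 'num >> 1' on int is floor division by 2 and 'num & 1' is the nonnegative
-- remainder mod 2 (exact for all Python ints, incl. negatives); same fuel totalization.
def base_m2_altF : Nat → Int → List Int
  | 0, _ => []
  | fuel+1, num =>
    if num = 0 then []
    else base_m2_altF fuel (-(PySem.Int.floordiv num 2)) ++ [PySem.Int.mod num 2]

def base_m2_alt (num : Int) : List Int := base_m2_altF (pvMeas num) num

-- ===== PRECONDITION & SPEC =====
def Spec_base_m2 (num : Int) (out : List Int) : Prop := out = base_m2_alt num
instance (num : Int) (out : List Int) : Decidable (Spec_base_m2 num out) := by unfold Spec_base_m2; infer_instance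

-- ===== CLAIM =====
def Claim_equal_base_m2 : Prop := ∀ (num : Int), Dom_base_m2 num → Spec_base_m2 num (base_m2 num)

-- ===== LEMMAS AND PROOFS =====
theorem pvMeas_even (num : Int) (h0 : num ≠ 0) (he : PySem.Int.mod num (-2) = 0) :
    pvMeas (PySem.Int.floordiv num (-2)) < pvMeas num := by
  have h1 := PySem.Int.floordiv_mul_add_mod num (-2)
  unfold pvMeas
  omega

theorem pvMeas_odd (num : Int) (h0 : num ≠ 0) (he : ¬ PySem.Int.mod num (-2) = 0) :
    pvMeas (PySem.Int.floordiv (num - 1) (-2)) < pvMeas num := by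
  have hb := PySem.Int.mod_neg_bounds num (b := -2) (by omega)
  have hb' := PySem.Int.mod_neg_bounds (num - 1) (b := -2) (by omega)
  have h1 := PySem.Int.floordiv_mul_add_mod num (-2)
  have h3 := PySem.Int.floordiv_mul_add_mod (num - 1) (-2)
  unfold pvMeas
  omega

-- even case: the two recurrences take the same step
theorem pv_step_even (num : Int) (he : PySem.Int.mod num (-2) = 0) :
    PySem.Int.mod num 2 = 0 ∧ -(PySem.Int.floordiv num 2) = PySem.Int.floordiv num (-2) := by
  have h1 := PySem.Int.floordiv_mul_add_mod num (-2)
  have h2 := PySem.Int.floordiv_mul_add_mod num 2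
  have hlo := PySem.Int.mod_nonneg num (b := 2) (by omega)
  have hhi := PySem.Int.mod_lt num (b := 2) (by omega)
  omega

-- odd case: the two recurrences take the same step
theorem pv_step_odd (num : Int) (he : ¬ PySem.Int.mod num (-2) = 0) :
    PySem.Int.mod num 2 = 1 ∧ -(PySem.Int.floordiv num 2) = PySem.Int.floordiv (num - 1) (-2) := by
  have hb := PySem.Int.mod_neg_bounds num (b := -2) (by omega)
  have hb' := PySem.Int.mod_neg_bounds (num - 1) (b := -2) (by omega)
  have h1 := PySem.Int.floordiv_mul_add_mod num (-2)
  have h3 := PySem.Int.floordiv_mul_add_mod (num - 1) (-2)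
  have h2 := PySem.Int.floordiv_mul_add_mod num 2
  have hlo := PySem.Int.mod_nonneg num (b := 2) (by omega)
  have hhi := PySem.Int.mod_lt num (b := 2) (by omega)
  omega

theorem base_m2_loopF_eq (fuel : Nat) : ∀ (num : Int) (acc : List Int), pvMeas num ≤ fuel →
    base_m2_loopF fuel num acc = acc ++ (base_m2_altF fuel num).reverse := by
  induction fuel with
  | zero =>
    intro num acc _
    simp [base_m2_loopF, base_m2_altF]
  | succ fuel ih =>
    intro num acc h
    by_cases h0 : num = 0
    · subst h0
      simp [base_m2_loopF, base_m2_altF]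
    · by_cases he : PySem.Int.mod num (-2) = 0
      · obtain ⟨hm, hq⟩ := pv_step_even num he
        have hlt := pvMeas_even num h0 he
        rw [base_m2_loopF, base_m2_altF, if_neg h0, if_pos he, if_neg h0, hm, hq,
          ih (PySem.Int.floordiv num (-2)) (acc ++ [0]) (by omega)]
        simp only [List.reverse_append, List.reverse_singleton, List.append_assoc,
          List.cons_append, List.nil_append]
      · obtain ⟨hm, hq⟩ := pv_step_odd num he
        have hlt := pvMeas_odd num h0 he
        rw [base_m2_loopF, base_m2_altF, if_neg h0, if_neg he, if_neg h0, hm, hq,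
          ih (PySem.Int.floordiv (num - 1) (-2)) (acc ++ [1]) (by omega)]
        simp only [List.reverse_append, List.reverse_singleton, List.append_assoc,
          List.cons_append, List.nil_append]

-- ===== VERDICT =====
theorem base_m2_spec : Claim_equal_base_m2 := by
  intro num _
  unfold Spec_base_m2 base_m2 base_m2_alt
  rw [base_m2_loopF_eq (pvMeas num) num [] (le_refl _)]
  simp
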